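-- pv_equiv track=rewrite | github.com/NG666666158/wechatauto | wechat_ai/wechat_runtime.py | _order_unread_messages
-- ===== SOURCE A (Python) =====
-- from collections import Counter
--
-- def _order_unread_messages(unread_messages: list[str], contexts: list[str]) -> list[str]:
--     cleaned_messages = [message.strip() for message in unread_messages if isinstance(message, str) and message.strip()]
--     if len(cleaned_messages) <= 1:
--         return cleaned_messages
--
--     context_timeline = [message.strip() for message in contexts if isinstance(message, str) and message.strip()]
--     if len(context_timeline) < len(cleaned_messages):
--         return cleaned_messages
--
--     remaining = Counter(cleaned_messages)
--     ordered_messages: list[str] = []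
--     for context_message in context_timeline:
--         if remaining.get(context_message, 0) <= 0:
--             continue
--         ordered_messages.append(context_message)
--         remaining[context_message] -= 1
--
--     if len(ordered_messages) != len(cleaned_messages):
--         return cleaned_messages
--     return ordered_messages
-- ===== SOURCE B (Python) =====
-- from collections import Counter
--
-- def _order_unread_messages(unread_messages: list[str], contexts: list[str]) -> list[str]:
--     cleaned_messages = [m.strip() for m in unread_messages if isinstance(m, str) and m.strip()]
--     if len(cleaned_messages) <= 1:
--         return cleaned_messages
--     context_timeline = [m.strip() for m in contexts if isinstance(m, str) and m.strip()]
--     if len(context_timeline) < len(cleaned_messages):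
--         return cleaned_messages
--
--     positions: dict[str, list[int]] = {}
--     for i, m in enumerate(context_timeline):
--         positions.setdefault(m, []).append(i)
--
--     picked: list[int] = []
--     for m, c in Counter(cleaned_messages).items():
--         avail = positions.get(m, [])
--         if len(avail) < c:
--             return cleaned_messages
--         picked.extend(avail[:c])
--     picked.sort()
--     return [context_timeline[i] for i in picked]
-- ===== Notes on version B (the rewrite author's own statement) =====
-- stated objective: alternative
-- what changed: Replaces the greedy single pass that consumes a Counter while scanning the timeline by an index-based plan: one pass builds a dict of each message's positions in the timeline, the needed number of earliest positions per distinct message are gathered (failing early to the fallback if any message is under-supplied), and the gathered indices are sorted and mapped back to messages.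
import Mathlib
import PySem

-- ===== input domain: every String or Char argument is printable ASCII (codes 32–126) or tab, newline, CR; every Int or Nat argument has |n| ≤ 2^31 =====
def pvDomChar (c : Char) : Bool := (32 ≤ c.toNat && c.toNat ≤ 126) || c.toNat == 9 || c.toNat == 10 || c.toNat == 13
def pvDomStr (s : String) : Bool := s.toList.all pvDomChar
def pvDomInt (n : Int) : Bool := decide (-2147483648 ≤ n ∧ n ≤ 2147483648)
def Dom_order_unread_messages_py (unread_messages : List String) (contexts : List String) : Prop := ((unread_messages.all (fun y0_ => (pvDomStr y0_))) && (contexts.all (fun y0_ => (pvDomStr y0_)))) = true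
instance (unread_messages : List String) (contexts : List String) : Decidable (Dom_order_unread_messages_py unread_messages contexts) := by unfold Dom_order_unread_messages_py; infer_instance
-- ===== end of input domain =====

-- B replaces A's Counter-consuming greedy scan of the timeline by a position-index plan
-- (positions dict + per-message take + sort); alternative decomposition, same return value.

-- shared helper: the Python list comprehension [m.strip() for m in xs if isinstance(m, str) and m.strip()]
def pvClean (xs : List String) : List String :=
  (xs.filter (fun m => PySem.Str.strip m != "")).map PySem.Str.strip

-- ===== PORT A =====
def order_unread_messages_py (unread_messages : List String) (contexts : List String) : List String :=
  let cleaned_messages := pvClean unread_messages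
  if cleaned_messages.length ≤ 1 then cleaned_messages
  else
    let context_timeline := pvClean contexts
    if context_timeline.length < cleaned_messages.length then cleaned_messages
    else
      let remaining : PySem.Dict String Int := PySem.Dict.counter cleaned_messages
      let res := context_timeline.foldl
        (fun (st : List String × PySem.Dict String Int) cm =>
          if st.2.getD cm 0 ≤ 0 then st
          else (st.1 ++ [cm], st.2.insert cm (st.2.getD cm 0 - 1)))
        ([], remaining)
      if res.1.length ≠ cleaned_messages.length then cleaned_messages
      else res.1

-- ===== PORT B =====
-- the for-loop over Counter(...).items() with an early `return cleaned_messages`: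
-- none = that early return was taken
def pvGather (positions : PySem.Dict String (List Int)) : List (String × Int) → Option (List Int)
  | [] => some []
  | (m, c) :: rest =>
    let avail := positions.getD m []
    if (avail.length : Int) < c then none
    else match pvGather positions rest with
      | none => none
      | some more => some (PySem.List.slice avail none (some c) ++ more)

def order_unread_messages_py_alt (unread_messages : List String) (contexts : List String) : List String :=
  let cleaned_messages := pvClean unread_messages
  if cleaned_messages.length ≤ 1 then cleaned_messages
  else
    let context_timeline := pvClean contexts
    if context_timeline.length < cleaned_messages.length then cleaned_messages
    else
      let positions := (PySem.List.enumerate context_timeline 0).foldl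
        (fun (d : PySem.Dict String (List Int)) p => d.modify p.2 [] (· ++ [p.1])) PySem.Dict.empty
      match pvGather positions (PySem.Dict.counter cleaned_messages).items with
      | none => cleaned_messages
      | some picked =>
        -- picked.sort(); [context_timeline[i] for i in picked] (indices are in range: pyGetD exact)
        (PySem.List.sorted picked (fun x => x) false).map
          (fun i => PySem.List.pyGetD context_timeline i "")

-- ===== PRECONDITION & SPEC =====
def Spec_order_unread_messages_py (unread_messages : List String) (contexts : List String) (out : List String) : Prop := out = order_unread_messages_py_alt unread_messages contexts
instance (unread_messages : List String) (contexts : List String) (out : List String) : Decidable (Spec_order_unread_messages_py unread_messages contexts out) := by unfold Spec_order_unread_messages_py; infer_instance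

-- ===== CLAIM (what is proved, stated in full; the proofs are below) =====
def Claim_equal_order_unread_messages_py : Prop := ∀ (unread_messages : List String) (contexts : List String), Dom_order_unread_messages_py unread_messages contexts → Spec_order_unread_messages_py unread_messages contexts (order_unread_messages_py unread_messages contexts)

-- ===== LEMMAS AND PROOFS =====

-- the common specification: take the next occurrence of m iff fewer than `need m` were taken
def selF (need : String → Nat) : (String → Nat) → List String → List String
  | _, [] => []
  | t, m :: rest =>
    if t m < need m then m :: selF need (fun x => if x = m then t x + 1 else t x) rest
    else selF need t rest

-- the list of (Int) positions of m in tl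
def posL (tl : List String) (m : String) : List Int :=
  ((PySem.List.enumerate tl 0).filter (fun p => p.2 == m)).map (·.1)

lemma foldA_eq (need : String → Nat) :
    ∀ (rest acc : List String) (d : PySem.Dict String Int) (t : String → Nat),
      (∀ m, d.getD m 0 = (need m : Int) - (t m : Int)) → (∀ m, t m ≤ need m) →
      (rest.foldl
        (fun (st : List String × PySem.Dict String Int) cm =>
          if st.2.getD cm 0 ≤ 0 then st
          else (st.1 ++ [cm], st.2.insert cm (st.2.getD cm 0 - 1)))
        (acc, d)).1 = acc ++ selF need t rest := by
  intro rest
  induction rest with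
  | nil => intro acc d t hd ht; simp [selF]
  | cons m rest ih =>
    intro acc d t hd ht
    simp only [List.foldl_cons, selF]
    by_cases hlt : t m < need m
    · have hcond : ¬ (d.getD m 0 ≤ 0) := by have h1 := hd m; have h2 := ht m; omega
      rw [if_neg hcond, if_pos hlt]
      have h1 : ∀ m', (d.insert m (d.getD m 0 - 1)).getD m' 0
          = (need m' : Int) - ((fun x => if x = m then t x + 1 else t x) m' : Int) := by
        intro m'
        rw [PySem.Dict.getD_insert]
        by_cases hmm : m' = m
        · subst hmm; simp [hd m']; ring
        · simp [hmm, hd m']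
      have h2 : ∀ m', (fun x => if x = m then t x + 1 else t x) m' ≤ need m' := by
        intro m'
        by_cases hmm : m' = m
        · subst hmm; simp; omega
        · simp [hmm]; exact ht m'
      rw [ih (acc ++ [m]) (d.insert m (d.getD m 0 - 1)) _ h1 h2]
      simp
    · have hcond : d.getD m 0 ≤ 0 := by have h1 := hd m; have h2 := ht m; omega
      rw [if_pos hcond, if_neg hlt]
      exact ih acc d t hd ht

lemma count_selF (need : String → Nat) :
    ∀ (rest : List String) (t : String → Nat), (∀ m, t m ≤ need m) → ∀ m',
      (selF need t rest).count m' = min (t m' + rest.count m') (need m') - t m' := by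
  intro rest
  induction rest with
  | nil => intro t ht m'; have := ht m'; simp [selF]
  | cons m rest ih =>
    intro t ht m'
    have htm := ht m
    have htm' := ht m'
    simp only [selF]
    by_cases hlt : t m < need m
    · rw [if_pos hlt]
      have ih' := ih (fun x => if x = m then t x + 1 else t x) (by
        intro x; by_cases hx : x = m
        · subst hx; simp; omega
        · simp [hx]; exact ht x) m'
      by_cases hmm : m' = m
      · subst hmm
        simp only [if_pos rfl] at ih'
        simp [List.count_cons, ih']
        omega
      · simp only [if_neg hmm] at ih'
        have hmn : m ≠ m' := fun h => hmm h.symm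
        simp [List.count_cons, hmm, hmn, ih']
    · rw [if_neg hlt]
      rw [ih t ht m']
      by_cases hmm : m' = m
      · subst hmm; simp [List.count_cons]; omega
      · have hmn : m ≠ m' := fun h => hmm h.symm
        simp [List.count_cons, hmm, hmn]

lemma length_selF_iff (cl tl : List String) :
    (selF (fun m => cl.count m) (fun _ => 0) tl).length = cl.length ↔
      ∀ m ∈ cl, cl.count m ≤ tl.count m := by
  have hc : ∀ m', (selF (fun m => cl.count m) (fun _ => 0) tl).count m'
      = min (tl.count m') (cl.count m') := by
    intro m'
    rw [count_selF (fun m => cl.count m) tl (fun _ => 0) (fun m => Nat.zero_le _) m']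
    simp
  have hsub : List.Subperm (selF (fun m => cl.count m) (fun _ => 0) tl) cl := by
    rw [List.subperm_ext_iff]
    intro x hx; rw [hc x]; omega
  constructor
  · intro hlen m hm
    have hperm := hsub.perm_of_length_le (le_of_eq hlen.symm)
    have hcnt := hperm.count_eq m
    rw [hc m] at hcnt; omega
  · intro h
    have hperm : (selF (fun m => cl.count m) (fun _ => 0) tl).Perm cl := by
      rw [List.perm_iff_count]; intro x; rw [hc x]
      by_cases hx : x ∈ cl
      · have := h x hx; omega
      · have : cl.count x = 0 := List.count_eq_zero.2 hx; omega
    exact hperm.length_eq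

lemma positions_getD (tl : List String) (m : String) :
    ((PySem.List.enumerate tl 0).foldl
      (fun (d : PySem.Dict String (List Int)) p => d.modify p.2 [] (· ++ [p.1]))
      PySem.Dict.empty).getD m [] = posL tl m := by
  have h : (PySem.List.enumerate tl 0).foldl
      (fun (d : PySem.Dict String (List Int)) p => d.modify p.2 [] (· ++ [p.1])) PySem.Dict.empty
    = ((PySem.List.enumerate tl 0).map Prod.swap).foldl
      (fun (d : PySem.Dict String (List Int)) q => d.modify q.1 [] (· ++ [q.2])) PySem.Dict.empty := by
    rw [List.foldl_map]
    rfl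
  rw [h, PySem.Dict.getD_foldl_modify_append]
  rw [List.filter_map, List.map_map]
  rfl

lemma length_posL (tl : List String) (m : String) : (posL tl m).length = tl.count m := by
  have h : tl.count m = (PySem.List.enumerate tl 0).countP (fun p => p.2 == m) := by
    conv_lhs => rw [← PySem.List.map_snd_enumerate tl 0]
    rw [List.count, List.countP_map]
    rfl
  rw [h, posL, List.length_map, List.countP_eq_length_filter]

lemma pairwise_posL (tl : List String) (m : String) : (posL tl m).Pairwise (· < ·) := by
  unfold posL
  apply List.Pairwise.map
  · intro a b h; exact h
  · exact (PySem.List.pairwise_lt_enumerate tl 0).filter _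

lemma mem_posL (tl : List String) (m : String) (j : Int) :
    j ∈ posL tl m ↔ (j, m) ∈ PySem.List.enumerate tl 0 := by
  simp only [posL, List.mem_map, List.mem_filter]
  constructor
  · rintro ⟨⟨i, m'⟩, ⟨hmem, hm⟩, hj⟩
    simp at hm hj; subst hm; subst hj; exact hmem
  · intro h; exact ⟨(j, m), ⟨h, by simp⟩, rfl⟩

lemma selF_append_singleton (need : String → Nat) :
    ∀ (l : List String) (t : String → Nat) (x : String), (∀ m, t m ≤ need m) →
      selF need t (l ++ [x]) = selF need t l ++ (if t x + l.count x < need x then [x] else []) := by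
  intro l
  induction l with
  | nil => intro t x ht; simp [selF]
  | cons m l ih =>
    intro t x ht
    simp only [List.cons_append, selF]
    by_cases hlt : t m < need m
    · have ht2 : ∀ m', (fun y => if y = m then t y + 1 else t y) m' ≤ need m' := by
        intro m'; by_cases hx : m' = m
        · subst hx; simp; omega
        · simp [hx]; exact ht m'
      have hcnt : (fun y => if y = m then t y + 1 else t y) x + l.count x = t x + (m :: l).count x := by
        by_cases hx : x = m
        · subst hx; simp [List.count_cons]; omega
        · have hmn : m ≠ x := fun h => hx h.symm
          simp [List.count_cons, hx, hmn]
      rw [if_pos hlt, if_pos hlt, ih _ x ht2, hcnt]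
      simp
    · have hge := ht m
      rw [if_neg hlt, if_neg hlt, ih t x ht]
      congr 1
      by_cases hx : x = m
      · subst hx
        rw [if_neg (by simp [List.count_cons]; omega), if_neg (by omega)]
      · have hmn : m ≠ x := fun h => hx h.symm
        simp [List.count_cons, hmn]


lemma pvGather_map (cl tl : List String) : ∀ (ks : List String),
    pvGather ((PySem.List.enumerate tl 0).foldl
        (fun (d : PySem.Dict String (List Int)) p => d.modify p.2 [] (· ++ [p.1]))
        PySem.Dict.empty)
      (ks.map (fun k => (k, (cl.count k : Int))))
      = if ∀ k ∈ ks, cl.count k ≤ tl.count k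
        then some ((ks.map (fun k => (posL tl k).take (cl.count k))).flatten)
        else none := by
  intro ks
  induction ks with
  | nil => simp [pvGather]
  | cons k ks ih =>
    simp only [List.map_cons, pvGather, positions_getD]
    rw [ih]
    by_cases hk : cl.count k ≤ tl.count k
    · have hnotlt : ¬ (((posL tl k).length : Int) < (cl.count k : Int)) := by
        rw [length_posL]; push_cast; omega
      rw [if_neg hnotlt]
      by_cases hks : ∀ k' ∈ ks, cl.count k' ≤ tl.count k'
      · rw [if_pos hks, if_pos (by
          intro k' hk'
          rcases List.mem_cons.1 hk' with h | h
          · subst h; exact hk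
          · exact hks k' h)]
        simp only [List.map_cons, List.flatten_cons]
        rw [PySem.List.slice_to_natCast]
      · rw [if_neg hks, if_neg (by
          intro hall; exact hks (fun k' hk' => hall k' (List.mem_cons_of_mem _ hk')))]
    · have hlt : ((posL tl k).length : Int) < (cl.count k : Int) := by
        rw [length_posL]; push_cast; omega
      rw [if_pos hlt, if_neg (by intro hall; exact hk (hall k List.mem_cons_self))]

lemma gather_counter (cl tl : List String) :
    pvGather ((PySem.List.enumerate tl 0).foldl
        (fun (d : PySem.Dict String (List Int)) p => d.modify p.2 [] (· ++ [p.1]))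
        PySem.Dict.empty)
      (PySem.Dict.counter cl).items
      = if ∀ m ∈ cl, cl.count m ≤ tl.count m
        then some (((PySem.Set.ofList cl).map (fun m => (posL tl m).take (cl.count m))).flatten)
        else none := by
  rw [PySem.Dict.items_counter, pvGather_map]
  by_cases h : ∀ m ∈ cl, cl.count m ≤ tl.count m
  · rw [if_pos h, if_pos (fun k hk => h k ((PySem.Set.mem_ofList _ _).1 hk))]
  · rw [if_neg h, if_neg (by
      intro hall
      exact h (fun m hm => hall m ((PySem.Set.mem_ofList _ _).2 hm)))]


lemma posL_append (tl : List String) (x m : String) :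
    posL (tl ++ [x]) m = posL tl m ++ (if x == m then [(tl.length : Int)] else []) := by
  unfold posL
  rw [PySem.List.enumerate_append, List.filter_append, List.map_append]
  congr 1
  by_cases hxm : x == m
  · simp [PySem.List.enumerate_cons, PySem.List.enumerate_nil, hxm]
  · simp [PySem.List.enumerate_cons, PySem.List.enumerate_nil, hxm]

lemma mem_posL_lt (tl : List String) (m : String) (j : Int) (h : j ∈ posL tl m) :
    j < (tl.length : Int) := by
  obtain ⟨k, hk, he⟩ := (PySem.List.mem_enumerate_iff _ _ _).1 ((mem_posL tl m j).1 h)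
  have : j = 0 + (k : Int) := by simpa using congrArg Prod.fst he
  omega

lemma snd_unique {tl : List String} {j : Int} {m m' : String}
    (h1 : (j, m) ∈ PySem.List.enumerate tl 0) (h2 : (j, m') ∈ PySem.List.enumerate tl 0) :
    m = m' := by
  obtain ⟨k, hk, he⟩ := (PySem.List.mem_enumerate_iff _ _ _).1 h1
  obtain ⟨k', hk', he'⟩ := (PySem.List.mem_enumerate_iff _ _ _).1 h2
  have e1 : j = 0 + (k : Int) := by simpa using congrArg Prod.fst he
  have e2 : j = 0 + (k' : Int) := by simpa using congrArg Prod.fst he'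
  have : k = k' := by omega
  subst this
  have f1 : m = tl[k] := by simpa using congrArg Prod.snd he
  have f2 : m' = tl[k] := by simpa using congrArg Prod.snd he'
  rw [f1, f2]

lemma mem_take_append_singleton {α} [DecidableEq α] (l : List α) (a j : α) (K : Nat) :
    j ∈ (l ++ [a]).take K ↔ j ∈ l.take K ∨ (j = a ∧ l.length < K) := by
  rw [List.take_append, List.mem_append]
  constructor
  · rintro (h | h)
    · exact Or.inl h
    · right
      rcases Nat.eq_zero_or_pos (K - l.length) with h0 | h0
      · rw [h0] at h; simp at h
      · rw [List.take_of_length_le (by simp; omega)] at h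
        simp at h; exact ⟨h, by omega⟩
  · rintro (h | ⟨rfl, hlen⟩)
    · exact Or.inl h
    · right
      rw [List.take_of_length_le (by simp; omega)]
      simp

lemma selF_append_singleton' (need : String → Nat) (l : List String) (x : String) :
    selF need (fun _ => 0) (l ++ [x])
      = selF need (fun _ => 0) l ++ (if l.count x < need x then [x] else []) := by
  have h := selF_append_singleton need l (fun _ => 0) x (fun m => Nat.zero_le _)
  simpa using h

lemma filter_map_snd_eq_selF (need : String → Nat) (tl : List String) :
    ((PySem.List.enumerate tl 0).filter
        (fun p => decide (p.1 ∈ (posL tl p.2).take (need p.2)))).map (·.2)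
      = selF need (fun _ => 0) tl := by
  induction tl using List.reverseRecOn with
  | nil => simp [selF, PySem.List.enumerate_nil]
  | append_singleton tl x ih =>
    rw [PySem.List.enumerate_append, List.filter_append, List.map_append]
    have hnew : PySem.List.enumerate [x] (0 + (tl.length : Int)) = [(((tl.length : Int)), x)] := by
      simp [PySem.List.enumerate_cons, PySem.List.enumerate_nil]
    rw [hnew]
    have hcongr : ∀ p ∈ PySem.List.enumerate tl 0,
        decide (p.1 ∈ (posL (tl ++ [x]) p.2).take (need p.2))
          = decide (p.1 ∈ (posL tl p.2).take (need p.2)) := by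
      intro p hp
      have hj : p.1 ∈ posL tl p.2 := (mem_posL _ _ _).2 (by cases p; exact hp)
      have hjlt := mem_posL_lt tl p.2 p.1 hj
      rw [posL_append]
      by_cases hxm : x == p.2
      · rw [if_pos hxm]
        simp only [decide_eq_decide]
        rw [mem_take_append_singleton]
        constructor
        · rintro (h | ⟨he, _⟩)
          · exact h
          · omega
        · exact Or.inl
      · rw [if_neg hxm]; simp
    rw [List.filter_congr hcongr, ih]
    have hpred : decide ((((tl.length : Int), x)).1 ∈ (posL (tl ++ [x]) (((tl.length : Int), x)).2).take (need (((tl.length : Int), x)).2)) = decide (tl.count x < need x) := by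
      simp only []
      simp only [posL_append, beq_self_eq_true, if_pos]
      simp only [decide_eq_decide]
      rw [mem_take_append_singleton]
      constructor
      · rintro (h | ⟨_, hlen⟩)
        · have := mem_posL_lt tl x _ (List.mem_of_mem_take h)
          omega
        · rw [length_posL] at hlen; exact hlen
      · intro h; right; exact ⟨rfl, by rw [length_posL]; exact h⟩
    rw [List.filter_singleton, hpred, selF_append_singleton' need tl x]
    by_cases hc : tl.count x < need x
    · simp [hc]
    · simp [hc]

lemma sorted_flatten_map (cl tl : List String) :
    (PySem.List.sorted (((PySem.Set.ofList cl).map (fun m => (posL tl m).take (cl.count m))).flatten)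
        (fun x => x) false).map (fun i => PySem.List.pyGetD tl i "")
      = selF (fun m => cl.count m) (fun _ => 0) tl := by
  set J := (PySem.List.enumerate tl 0).filter
      (fun p => decide (p.1 ∈ (posL tl p.2).take (cl.count p.2))) with hJ
  have hJenum : ∀ p ∈ J, p ∈ PySem.List.enumerate tl 0 := fun p hp => List.mem_of_mem_filter hp
  have hpairJ : (J.map (·.1)).Pairwise (· < ·) := by
    apply List.Pairwise.map (R := fun p q : Int × String => p.1 < q.1)
    · intro a b h; exact h
    · exact (PySem.List.pairwise_lt_enumerate tl 0).filter _
  have hmemJ : ∀ j : Int, j ∈ J.map (·.1) ↔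
      ∃ m ∈ PySem.Set.ofList cl, j ∈ (posL tl m).take (cl.count m) := by
    intro j
    constructor
    · intro hj
      obtain ⟨p, hpJ, rfl⟩ := List.mem_map.1 hj
      have h2 : p.1 ∈ (posL tl p.2).take (cl.count p.2) := by
        simpa using (List.mem_filter.1 hpJ).2
      refine ⟨p.2, (PySem.Set.mem_ofList _ _).2 ?_, h2⟩
      apply List.count_pos_iff.1
      rcases Nat.eq_zero_or_pos (cl.count p.2) with h0 | h0
      · rw [h0] at h2; simp at h2
      · exact h0
    · rintro ⟨m, hm, hjt⟩
      have henum : (j, m) ∈ PySem.List.enumerate tl 0 :=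
        (mem_posL _ _ _).1 (List.mem_of_mem_take hjt)
      exact List.mem_map.2 ⟨(j, m), List.mem_filter.2 ⟨henum, by simpa using hjt⟩, rfl⟩
  have hnodupJ : (J.map (·.1)).Nodup := hpairJ.imp (fun h => ne_of_lt h)
  have hnodupF : (((PySem.Set.ofList cl).map
      (fun m => (posL tl m).take (cl.count m))).flatten).Nodup := by
    rw [List.nodup_flatten]
    constructor
    · intro l hl
      obtain ⟨m, hm, rfl⟩ := List.mem_map.1 hl
      exact (((pairwise_posL tl m).sublist (List.take_sublist _ _)).imp (fun h => ne_of_lt h))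
    · refine List.Pairwise.map _ (fun a b hab => ?_) (PySem.Set.nodup_ofList cl)
      intro j hja hjb
      exact hab (snd_unique ((mem_posL _ _ _).1 (List.mem_of_mem_take hja))
        ((mem_posL _ _ _).1 (List.mem_of_mem_take hjb)))
  have hperm : (J.map (·.1)).Perm
      (((PySem.Set.ofList cl).map (fun m => (posL tl m).take (cl.count m))).flatten) := by
    apply (List.perm_ext_iff_of_nodup hnodupJ hnodupF).2
    intro j
    rw [hmemJ, List.mem_flatten]
    constructor
    · rintro ⟨m, hm, hj⟩
      exact ⟨(posL tl m).take (cl.count m), List.mem_map_of_mem hm, hj⟩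
    · rintro ⟨l, hl, hj⟩
      obtain ⟨m, hm, rfl⟩ := List.mem_map.1 hl
      exact ⟨m, hm, hj⟩
  have hs := PySem.List.sorted_eq_of_perm_of_pairwise_lt (xs := (((PySem.Set.ofList cl).map
      (fun m => (posL tl m).take (cl.count m))).flatten)) (ys := J.map (·.1)) (fun x => x) hperm hpairJ
  rw [hs, List.map_map]
  have hget : ∀ p ∈ J, ((fun i => PySem.List.pyGetD tl i "") ∘ (·.1)) p = (·.2) p := by
    intro p hp
    obtain ⟨k, hk, rfl⟩ := (PySem.List.mem_enumerate_iff _ _ _).1 (hJenum p hp)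
    simp [List.getD_eq_getElem, hk]
  rw [List.map_congr_left hget, hJ]
  exact filter_map_snd_eq_selF (fun m => cl.count m) tl

-- ===== VERDICT (by name: the statement is the Claim_ definition above) =====
theorem order_unread_messages_py_spec : Claim_equal_order_unread_messages_py := by
  intro unread_messages contexts _
  unfold Spec_order_unread_messages_py order_unread_messages_py order_unread_messages_py_alt
  by_cases h1 : (pvClean unread_messages).length ≤ 1
  · simp only [h1, if_pos]
  · simp only [h1, if_neg, if_false]
    by_cases h2 : (pvClean contexts).length < (pvClean unread_messages).length
    · simp only [h2, if_pos]
    · simp only [h2, if_neg, if_false]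
      set cl := pvClean unread_messages with hcl
      set tl := pvClean contexts with htl
      have hA : (tl.foldl
          (fun (st : List String × PySem.Dict String Int) cm =>
            if st.2.getD cm 0 ≤ 0 then st
            else (st.1 ++ [cm], st.2.insert cm (st.2.getD cm 0 - 1)))
          ([], PySem.Dict.counter cl)).1 = selF (fun m => cl.count m) (fun _ => 0) tl := by
        have := foldA_eq (fun m => cl.count m) tl [] (PySem.Dict.counter cl) (fun _ => 0)
          (by intro m; rw [PySem.Dict.getD_counter]; simp) (fun m => Nat.zero_le _)
        simpa using this
      rw [gather_counter]
      by_cases h3 : ∀ m ∈ cl, cl.count m ≤ tl.count m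
      · rw [if_pos h3]
        have hlen : (selF (fun m => cl.count m) (fun _ => 0) tl).length = cl.length :=
          (length_selF_iff cl tl).2 h3
        rw [hA, if_neg (by rw [hlen]; simp)]
        exact (sorted_flatten_map cl tl).symm
      · rw [if_neg h3]
        have hlen : ¬ (selF (fun m => cl.count m) (fun _ => 0) tl).length = cl.length := by
          rw [length_selF_iff cl tl]; exact h3
        rw [hA, if_pos hlen]
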